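-- pv_equiv track=rewrite | github.com/BugBubbles/Multiprocessor | utils/file_div.py | _balanced_ranges
-- ===== SOURCE A (Python) =====
-- def _get_balanced_part_nums(total, part_size):
--     base = total // part_size
--     remainder = total % part_size
--     return [base + int(i < remainder) for i in range(part_size)]
--
-- def _balanced_ranges(total, part_size):
--     balanced_part_nums = _get_balanced_part_nums(total, part_size)
--     ranges = []
--     start = 0
--     for part_num in balanced_part_nums:
--         end = start + part_num
--         ranges.append((start, end))
--         start = end
--     return ranges
-- ===== SOURCE B (Python) =====
-- def _balanced_ranges(total, part_size):
--     base = total // part_size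
--     remainder = total % part_size
--     return [(i * base + min(i, remainder), (i + 1) * base + min(i + 1, remainder))
--             for i in range(part_size)]
-- ===== Notes on version B (the rewrite author's own statement) =====
-- stated objective: alternative
-- what changed: Replaces A's two-pass strategy (build a list of part sizes, then sweep it with a running start/end accumulator) by a single comprehension computing each range independently in closed form: (i*base + min(i, r), (i+1)*base + min(i+1, r)).
-- outside the precondition, e.g. on _balanced_ranges(10, 0): A raises ZeroDivisionError, B raises ZeroDivisionError
import Mathlib
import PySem

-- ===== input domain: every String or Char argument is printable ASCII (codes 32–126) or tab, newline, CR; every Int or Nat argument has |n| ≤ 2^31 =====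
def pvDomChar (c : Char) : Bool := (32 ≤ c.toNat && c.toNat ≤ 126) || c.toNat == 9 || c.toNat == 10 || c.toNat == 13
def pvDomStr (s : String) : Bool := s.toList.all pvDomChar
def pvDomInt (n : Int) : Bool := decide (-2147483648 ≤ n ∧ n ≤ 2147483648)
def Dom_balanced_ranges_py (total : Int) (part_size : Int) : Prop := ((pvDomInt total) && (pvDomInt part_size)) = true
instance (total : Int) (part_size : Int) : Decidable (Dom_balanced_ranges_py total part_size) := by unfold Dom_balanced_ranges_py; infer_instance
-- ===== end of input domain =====

-- B replaces A's two-pass sizes-then-running-sum sweep by an independent closed-form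
-- computation of each range endpoint (alternative decomposition, same cost).

-- ===== PORT A =====
-- helper _get_balanced_part_nums
def pv_get_balanced_part_nums (total : Int) (part_size : Int) : List Int :=
  let base := PySem.Int.floordiv total part_size
  let remainder := PySem.Int.mod total part_size
  (PySem.List.pyRange 0 part_size 1).map (fun i => base + (if i < remainder then (1:Int) else 0))

def balanced_ranges_py (total : Int) (part_size : Int) : List (Int × Int) :=
  let balanced_part_nums := pv_get_balanced_part_nums total part_size
  -- the for-loop with state (ranges, start)
  (balanced_part_nums.foldl
    (fun (st : List (Int × Int) × Int) part_num =>
      let eend := st.2 + part_num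
      (st.1 ++ [(st.2, eend)], eend))
    ([], 0)).1

-- ===== PORT B =====
def balanced_ranges_py_alt (total : Int) (part_size : Int) : List (Int × Int) :=
  let base := PySem.Int.floordiv total part_size
  let remainder := PySem.Int.mod total part_size
  (PySem.List.pyRange 0 part_size 1).map
    (fun i => (i * base + min i remainder, (i + 1) * base + min (i + 1) remainder))

-- ===== PRECONDITION & SPEC =====
-- Pre_ excludes exactly part_size = 0, where Python A raises ZeroDivisionError.
def Pre_balanced_ranges_py (total : Int) (part_size : Int) : Prop := part_size ≠ 0
instance (total : Int) (part_size : Int) : Decidable (Pre_balanced_ranges_py total part_size) := by unfold Pre_balanced_ranges_py; infer_instance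
def pvWitness_balanced_ranges_py : Int × Int := (10, 3)

def Spec_balanced_ranges_py (total : Int) (part_size : Int) (out : List (Int × Int)) : Prop := out = balanced_ranges_py_alt total part_size
instance (total : Int) (part_size : Int) (out : List (Int × Int)) : Decidable (Spec_balanced_ranges_py total part_size out) := by unfold Spec_balanced_ranges_py; infer_instance

-- ===== CLAIM (what is proved, stated in full; the proofs are below) =====
def Claim_equal_balanced_ranges_py : Prop := ∀ (total : Int) (part_size : Int), Dom_balanced_ranges_py total part_size → Pre_balanced_ranges_py total part_size → Spec_balanced_ranges_py total part_size (balanced_ranges_py total part_size)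

-- ===== LEMMAS AND PROOFS =====

-- A's loop over the first n sizes produces exactly the first n closed-form ranges,
-- with running start n*base + min n r (r ≥ 0).
theorem pv_fold_closed (base r : Int) (hr : 0 ≤ r) (n : Nat) :
    (((List.range n).map (fun (k : Nat) => base + (if (k : Int) < r then (1:Int) else 0))).foldl
      (fun (st : List (Int × Int) × Int) part_num =>
        let eend := st.2 + part_num
        (st.1 ++ [(st.2, eend)], eend))
      ([], 0))
    = ((List.range n).map
        (fun (k : Nat) => ((k : Int) * base + min (k : Int) r, ((k : Int) + 1) * base + min ((k : Int) + 1) r)),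
       (n : Int) * base + min (n : Int) r) := by
  induction n with
  | zero => simp; omega
  | succ m ih =>
    rw [List.range_succ, List.map_append, List.foldl_append, ih, List.map_append]
    simp only [List.map_cons, List.map_nil, List.foldl_cons, List.foldl_nil]
    refine Prod.ext ?_ ?_
    · simp only []
      congr 1
      have : ((m:Int) * base + min (m:Int) r + (base + if (m:Int) < r then (1:Int) else 0))
           = (((m:Int) + 1) * base + min ((m:Int) + 1) r) := by
        split_ifs with h <;> ring_nf <;> omega
      rw [this]
    · push_cast; split_ifs with h <;> ring_nf <;> omega

theorem balanced_ranges_py_spec : Claim_equal_balanced_ranges_py := by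
  intro total part_size _ hpre
  unfold Spec_balanced_ranges_py balanced_ranges_py balanced_ranges_py_alt pv_get_balanced_part_nums
  rcases lt_trichotomy part_size 0 with hneg | hz | hpos
  · -- empty range on both sides
    have : PySem.List.pyRange 0 part_size 1 = [] := by
      simp [PySem.List.pyRange]; omega
    simp [this]
  · exact absurd hz hpre
  · have hrange : PySem.List.pyRange 0 part_size 1 = (List.range part_size.toNat).map (Int.ofNat) := by
      have := PySem.List.pyRange_zero_natCast part_size.toNat
      rw [Int.toNat_of_nonneg (le_of_lt hpos)] at this
      simpa using this
    have hr : 0 ≤ PySem.Int.mod total part_size := PySem.Int.mod_nonneg total hpos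
    simp only [hrange, List.map_map]
    simpa [Function.comp_def] using
      congrArg Prod.fst
        (pv_fold_closed (PySem.Int.floordiv total part_size) (PySem.Int.mod total part_size) hr
          part_size.toNat)

-- ===== VERDICT (by name: the statement is the Claim_ definition above) =====
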